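-- pv_equiv track=rewrite | github.com/alexpekarovsky/agent-leader | scripts/autopilot/dashboard_tui.py | _task_activity_for_agent
-- ===== SOURCE A (Python) =====
-- from typing import Any, Dict, List, Optional, Tuple
--
-- def _task_activity_for_agent(agent: str, tasks: List[Dict[str, Any]]) -> str:
--     owned = [t for t in tasks if str(t.get("owner", "")).strip() == agent]
--     statuses = {str(t.get("status", "")).strip().lower() for t in owned}
--     if "in_progress" in statuses:
--         return "working"
--     if "blocked" in statuses:
--         return "blocked"
--     if statuses.intersection({"assigned", "reported", "bug_open"}):
--         return "queued"
--     return "idle"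
-- ===== SOURCE B (Python) =====
-- _LEVEL = {"in_progress": 3, "blocked": 2, "assigned": 1, "reported": 1, "bug_open": 1}
-- _NAME = ["idle", "queued", "blocked", "working"]
--
-- def _task_activity_for_agent(agent, tasks):
--     best = 0
--     for t in tasks:
--         if str(t.get("owner", "")).strip() == agent:
--             best = max(best, _LEVEL.get(str(t.get("status", "")).strip().lower(), 0))
--     return _NAME[best]
-- ===== Notes on version B (the rewrite author's own statement) =====
-- stated objective: alternative
-- what changed: Replaces A's build-a-status-set-then-query-it-in-priority-order cascade with a numeric severity ranking: each status maps to a level (working=3, blocked=2, queued=1, other=0), one pass keeps the maximum level over owned tasks, and the answer is a table lookup at that level.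
import Mathlib
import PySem

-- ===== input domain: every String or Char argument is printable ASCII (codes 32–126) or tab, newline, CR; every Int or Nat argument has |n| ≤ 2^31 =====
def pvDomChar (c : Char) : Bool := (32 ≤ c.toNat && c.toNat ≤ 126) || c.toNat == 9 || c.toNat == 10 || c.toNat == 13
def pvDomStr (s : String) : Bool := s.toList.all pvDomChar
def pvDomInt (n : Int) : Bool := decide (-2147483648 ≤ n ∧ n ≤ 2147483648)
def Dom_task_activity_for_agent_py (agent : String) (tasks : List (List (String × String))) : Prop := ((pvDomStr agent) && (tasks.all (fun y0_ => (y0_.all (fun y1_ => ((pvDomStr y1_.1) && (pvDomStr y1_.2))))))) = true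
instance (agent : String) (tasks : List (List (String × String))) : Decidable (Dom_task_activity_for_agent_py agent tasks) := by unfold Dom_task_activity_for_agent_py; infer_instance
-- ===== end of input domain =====

-- B replaces A's status-set + priority cascade with a numeric severity ranking: one pass keeps the
-- maximum severity level over owned tasks, and the result is a table lookup at that level (alternative).

-- ===== PORT A =====
def task_activity_for_agent_py (agent : String) (tasks : List (List (String × String))) : String :=
  let owned := tasks.filter (fun t => PySem.Str.strip (PySem.Dict.getD (PySem.Dict.mk t) "owner" "") == agent)
  let statuses : PySem.Set String :=
    PySem.Set.ofList (owned.map (fun t => PySem.Str.lower (PySem.Str.strip (PySem.Dict.getD (PySem.Dict.mk t) "status" ""))))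
  if PySem.Set.contains statuses "in_progress" then "working"
  else if PySem.Set.contains statuses "blocked" then "blocked"
  else if !(PySem.Set.inter statuses (PySem.Set.ofList ["assigned", "reported", "bug_open"])).isEmpty then "queued"
  else "idle"

-- ===== PORT B =====
-- _LEVEL = {"in_progress": 3, "blocked": 2, "assigned": 1, "reported": 1, "bug_open": 1}
def pvLevelDict : PySem.Dict String Int :=
  PySem.Dict.mk [("in_progress", 3), ("blocked", 2), ("assigned", 1), ("reported", 1), ("bug_open", 1)]
-- _NAME = ["idle", "queued", "blocked", "working"]
def pvNameTable : List String := ["idle", "queued", "blocked", "working"]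

def task_activity_for_agent_py_alt (agent : String) (tasks : List (List (String × String))) : String :=
  let best : Int := tasks.foldl (fun best t =>
    if PySem.Str.strip (PySem.Dict.getD (PySem.Dict.mk t) "owner" "") == agent then
      max best (PySem.Dict.getD pvLevelDict (PySem.Str.lower (PySem.Str.strip (PySem.Dict.getD (PySem.Dict.mk t) "status" ""))) 0)
    else best) 0
  -- _NAME[best]; 0 ≤ best ≤ 3 always holds, so the Python index never raises and getD "" is never taken
  (PySem.List.pyGet? pvNameTable best).getD ""

-- ===== PRECONDITION & SPEC =====
def Spec_task_activity_for_agent_py (agent : String) (tasks : List (List (String × String))) (out : String) : Prop := out = task_activity_for_agent_py_alt agent tasks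
instance (agent : String) (tasks : List (List (String × String))) (out : String) : Decidable (Spec_task_activity_for_agent_py agent tasks out) := by unfold Spec_task_activity_for_agent_py; infer_instance

-- ===== CLAIM (what is proved, stated in full; the proofs are below) =====
def Claim_equal_task_activity_for_agent_py : Prop := ∀ (agent : String) (tasks : List (List (String × String))), Dom_task_activity_for_agent_py agent tasks → Spec_task_activity_for_agent_py agent tasks (task_activity_for_agent_py agent tasks)

-- ===== LEMMAS AND PROOFS =====

def pvOwned (agent : String) (t : List (String × String)) : Bool :=
  PySem.Str.strip (PySem.Dict.getD (PySem.Dict.mk t) "owner" "") == agent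

def pvStatus (t : List (String × String)) : String :=
  PySem.Str.lower (PySem.Str.strip (PySem.Dict.getD (PySem.Dict.mk t) "status" ""))

-- the three "some owned task has this kind of status" tests both sides reduce to
def pvW (agent : String) (tasks : List (List (String × String))) : Bool :=
  tasks.any (fun t => pvOwned agent t && (pvStatus t == "in_progress"))
def pvB (agent : String) (tasks : List (List (String × String))) : Bool :=
  tasks.any (fun t => pvOwned agent t && (pvStatus t == "blocked"))
def pvQ (agent : String) (tasks : List (List (String × String))) : Bool :=
  tasks.any (fun t => pvOwned agent t &&
    (pvStatus t == "assigned" || pvStatus t == "reported" || pvStatus t == "bug_open"))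

-- membership in A's statuses set, characterised over the original task list
theorem mem_statuses (agent : String) (tasks : List (List (String × String))) (y : String) :
    y ∈ PySem.Set.ofList
        ((tasks.filter (fun t => PySem.Str.strip (PySem.Dict.getD (PySem.Dict.mk t) "owner" "") == agent)).map
          (fun t => PySem.Str.lower (PySem.Str.strip (PySem.Dict.getD (PySem.Dict.mk t) "status" ""))))
    ↔ ∃ t ∈ tasks, pvOwned agent t = true ∧ pvStatus t = y := by
  rw [PySem.Set.mem_ofList]
  simp only [List.mem_map, List.mem_filter, pvOwned, pvStatus]
  constructor
  · rintro ⟨t, ⟨ht, hown⟩, hst⟩; exact ⟨t, ht, hown, hst⟩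
  · rintro ⟨t, ht, hown, hst⟩; exact ⟨t, ⟨ht, hown⟩, hst⟩

theorem contains_statuses (agent : String) (tasks : List (List (String × String))) (x : String) :
    PySem.Set.contains
      (PySem.Set.ofList
        ((tasks.filter (fun t => PySem.Str.strip (PySem.Dict.getD (PySem.Dict.mk t) "owner" "") == agent)).map
          (fun t => PySem.Str.lower (PySem.Str.strip (PySem.Dict.getD (PySem.Dict.mk t) "status" ""))))) x
    = tasks.any (fun t => pvOwned agent t && (pvStatus t == x)) := by
  have h1 := (PySem.Set.contains_iff _ x).trans (mem_statuses agent tasks x)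
  have h2 : tasks.any (fun t => pvOwned agent t && (pvStatus t == x)) = true
      ↔ ∃ t ∈ tasks, pvOwned agent t = true ∧ pvStatus t = x := by
    simp only [List.any_eq_true, Bool.and_eq_true, beq_iff_eq]
  cases hc : tasks.any (fun t => pvOwned agent t && (pvStatus t == x)) with
  | true => exact h1.mpr (h2.mp hc)
  | false =>
    rw [Bool.eq_false_iff] at hc ⊢
    intro h; exact hc (h2.mpr (h1.mp h))

theorem not_isEmpty_inter {α : Type} [BEq α] [LawfulBEq α] (s t : PySem.Set α) (q : Bool)
    (h : q = true ↔ ∃ y, y ∈ s ∧ y ∈ t) : (!(PySem.Set.inter s t).isEmpty) = q := by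
  have h2 : (PySem.Set.inter s t).isEmpty = false ↔ ∃ y, y ∈ s ∧ y ∈ t := by
    rw [List.isEmpty_eq_false_iff_exists_mem]
    constructor
    · rintro ⟨y, hy⟩; exact ⟨y, (PySem.Set.mem_inter s t y).mp hy⟩
    · rintro ⟨y, hy⟩; exact ⟨y, (PySem.Set.mem_inter s t y).mpr hy⟩
  have hbool : ∀ (x q : Bool), (x = false ↔ q = true) → (!x) = q := by decide
  exact hbool _ _ (h2.trans h.symm)

set_option maxHeartbeats 400000 in
theorem inter_nonempty (agent : String) (tasks : List (List (String × String))) :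
    (!(PySem.Set.inter
        (PySem.Set.ofList
          ((tasks.filter (fun t => PySem.Str.strip (PySem.Dict.getD (PySem.Dict.mk t) "owner" "") == agent)).map
            (fun t => PySem.Str.lower (PySem.Str.strip (PySem.Dict.getD (PySem.Dict.mk t) "status" "")))))
        (PySem.Set.ofList ["assigned", "reported", "bug_open"])).isEmpty)
    = pvQ agent tasks := by
  apply not_isEmpty_inter
  constructor
  · intro h
    simp only [pvQ, List.any_eq_true, Bool.and_eq_true, Bool.or_eq_true, beq_iff_eq] at h
    obtain ⟨t, ht, hown, hst⟩ := h
    refine ⟨pvStatus t, (mem_statuses agent tasks (pvStatus t)).mpr ⟨t, ht, hown, rfl⟩, ?_⟩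
    rw [PySem.Set.mem_ofList]
    rcases hst with (h | h) | h
    · rw [h]; decide
    · rw [h]; decide
    · rw [h]; decide
  · rintro ⟨y, hy1, hy2⟩
    obtain ⟨t, ht, hown, hst⟩ := (mem_statuses agent tasks y).mp hy1
    rw [PySem.Set.mem_ofList] at hy2
    simp only [List.mem_cons, List.not_mem_nil, or_false] at hy2
    simp only [pvQ, List.any_eq_true, Bool.and_eq_true, Bool.or_eq_true, beq_iff_eq]
    refine ⟨t, ht, hown, ?_⟩
    rcases hy2 with h | h | h
    · exact Or.inl (Or.inl (hst.trans h))
    · exact Or.inl (Or.inr (hst.trans h))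
    · exact Or.inr (hst.trans h)

theorem pvLevelDict_getD (s : String) :
    PySem.Dict.getD pvLevelDict s 0 =
      (if s == "in_progress" then 3
       else if s == "blocked" then 2
       else if s == "assigned" || s == "reported" || s == "bug_open" then (1:Int) else 0) := by
  rcases eq_or_ne s "in_progress" with rfl | h1
  · decide
  rcases eq_or_ne s "blocked" with rfl | h2
  · decide
  rcases eq_or_ne s "assigned" with rfl | h3
  · decide
  rcases eq_or_ne s "reported" with rfl | h4
  · decide
  rcases eq_or_ne s "bug_open" with rfl | h5
  · decide
  have b1 : ("in_progress" == s) = false := by simp [Ne.symm h1]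
  have b2 : ("blocked" == s) = false := by simp [Ne.symm h2]
  have b3 : ("assigned" == s) = false := by simp [Ne.symm h3]
  have b4 : ("reported" == s) = false := by simp [Ne.symm h4]
  have b5 : ("bug_open" == s) = false := by simp [Ne.symm h5]
  simp [pvLevelDict, PySem.Dict.getD, PySem.Dict.get?, List.find?, b1, b2, b3, b4, b5, h1, h2, h3, h4, h5]

set_option maxHeartbeats 1000000 in
-- B's fold computes the maximum severity level over owned tasks (with A's cascade as its value)
theorem foldl_best (agent : String) (tasks : List (List (String × String))) (b : Int) (hb : 0 ≤ b) :
    tasks.foldl (fun best t =>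
      if PySem.Str.strip (PySem.Dict.getD (PySem.Dict.mk t) "owner" "") == agent then
        max best (PySem.Dict.getD pvLevelDict (PySem.Str.lower (PySem.Str.strip (PySem.Dict.getD (PySem.Dict.mk t) "status" ""))) 0)
      else best) b
    = max b (if pvW agent tasks then 3 else if pvB agent tasks then 2 else if pvQ agent tasks then 1 else 0) := by
  induction tasks generalizing b with
  | nil => simp [pvW, pvB, pvQ]; omega
  | cons t ts ih =>
    simp only [List.foldl_cons]
    have hacc : (0:Int) ≤ (if (PySem.Str.strip (PySem.Dict.getD (PySem.Dict.mk t) "owner" "") == agent) = true then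
        max b (PySem.Dict.getD pvLevelDict (PySem.Str.lower (PySem.Str.strip (PySem.Dict.getD (PySem.Dict.mk t) "status" ""))) 0)
      else b) := by
      split_ifs
      · exact le_trans hb (le_max_left _ _)
      · exact hb
    rw [ih _ hacc]
    simp only [pvW, pvB, pvQ, List.any_cons]
    by_cases ho : (PySem.Str.strip (PySem.Dict.getD (PySem.Dict.mk t) "owner" "") == agent) = true
    · rw [if_pos ho]
      have hown : pvOwned agent t = true := ho
      rw [pvLevelDict_getD]
      have hs : PySem.Str.lower (PySem.Str.strip (PySem.Dict.getD (PySem.Dict.mk t) "status" "")) = pvStatus t := rfl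
      rw [hs]
      simp only [hown, Bool.true_and]
      by_cases h1 : pvStatus t = "in_progress" <;> by_cases h2 : pvStatus t = "blocked" <;>
        by_cases h3 : pvStatus t = "assigned" <;> by_cases h4 : pvStatus t = "reported" <;>
        by_cases h5 : pvStatus t = "bug_open" <;>
        simp_all <;> split_ifs <;> omega
    · rw [if_neg ho]
      have hown : pvOwned agent t = false := by
        simpa [pvOwned] using ho
      simp [hown]

theorem task_activity_for_agent_py_eq (agent : String) (tasks : List (List (String × String))) :
    task_activity_for_agent_py agent tasks = task_activity_for_agent_py_alt agent tasks := by
  simp only [task_activity_for_agent_py, task_activity_for_agent_py_alt,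
    foldl_best agent tasks 0 le_rfl, contains_statuses, inter_nonempty]
  show (if pvW agent tasks = true then "working"
    else if pvB agent tasks = true then "blocked"
    else if pvQ agent tasks = true then "queued" else "idle") = _
  by_cases h1 : pvW agent tasks <;> by_cases h2 : pvB agent tasks <;> by_cases h3 : pvQ agent tasks <;>
    simp only [h1, h2, h3, if_true, if_false, Bool.false_eq_true] <;> simp <;> rfl

-- ===== VERDICT (by name: the statement is the Claim_ definition above) =====
theorem task_activity_for_agent_py_spec : Claim_equal_task_activity_for_agent_py := by
  intro agent tasks _
  exact task_activity_for_agent_py_eq agent tasks
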